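-- pv_equiv track=rewrite | github.com/dvhthomas/kno | .github/scripts/pr_validate.py | validate_issue_labels
-- ===== SOURCE A (Python) =====
-- TYPE_LABELS = frozenset({"enhancement", "bug", "documentation", "chore"})
--
-- def validate_issue_labels(labels: list[str], issue_num: int) -> list[str]:
--     """Return failures for missing type / area labels on the linked issue."""
--     failures: list[str] = []
--     if not any(label in TYPE_LABELS for label in labels):
--         failures.append(
--             f"Linked issue #{issue_num} lacks a type label. "
--             "Add one of: enhancement, bug, documentation, chore."
--         )
--     if not any(label.startswith("area:") for label in labels):
--         failures.append(
--             f"Linked issue #{issue_num} lacks an `area:*` label. "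
--             "See .github/labels.yml for the catalogue."
--         )
--     return failures
-- ===== SOURCE B (Python) =====
-- TYPE_LABELS = frozenset({"enhancement", "bug", "documentation", "chore"})
--
-- def validate_issue_labels(labels: list[str], issue_num: int) -> list[str]:
--     """Return failures for missing type / area labels on the linked issue."""
--     has_type = False
--     has_area = False
--     for label in labels:
--         if has_type and has_area:
--             break
--         has_type = has_type or label in TYPE_LABELS
--         has_area = has_area or label.startswith("area:")
--     failures: list[str] = []
--     if not has_type:
--         failures.append(
--             f"Linked issue #{issue_num} lacks a type label. "
--             "Add one of: enhancement, bug, documentation, chore."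
--         )
--     if not has_area:
--         failures.append(
--             f"Linked issue #{issue_num} lacks an `area:*` label. "
--             "See .github/labels.yml for the catalogue."
--         )
--     return failures
-- ===== Notes on version B (the rewrite author's own statement) =====
-- stated objective: alternative
-- what changed: The two independent any() scans over labels are fused into one pass that maintains has_type/has_area flags with an early break once both are set, then emits the same messages in the same order.
import Mathlib
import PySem

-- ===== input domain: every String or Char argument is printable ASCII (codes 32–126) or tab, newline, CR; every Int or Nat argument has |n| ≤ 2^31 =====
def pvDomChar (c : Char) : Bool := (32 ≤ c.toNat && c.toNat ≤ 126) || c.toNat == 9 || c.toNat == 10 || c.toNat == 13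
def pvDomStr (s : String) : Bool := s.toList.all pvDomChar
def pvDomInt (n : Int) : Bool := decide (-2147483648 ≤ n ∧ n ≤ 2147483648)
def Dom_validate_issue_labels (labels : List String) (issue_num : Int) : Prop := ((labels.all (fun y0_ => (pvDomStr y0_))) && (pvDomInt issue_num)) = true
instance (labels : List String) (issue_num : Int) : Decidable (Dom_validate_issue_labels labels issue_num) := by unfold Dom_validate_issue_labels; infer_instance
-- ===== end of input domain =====

-- B fuses A's two any() scans into one early-breaking pass that maintains two flags; same output.


-- ===== PORT A =====
def TYPE_LABELS : List String := ["enhancement", "bug", "documentation", "chore"]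

def typeMsg (issue_num : Int) : String :=
  "Linked issue #" ++ PySem.Int.toStr issue_num ++ " lacks a type label. Add one of: enhancement, bug, documentation, chore."

def areaMsg (issue_num : Int) : String :=
  "Linked issue #" ++ PySem.Int.toStr issue_num ++ " lacks an `area:*` label. See .github/labels.yml for the catalogue."

def validate_issue_labels (labels : List String) (issue_num : Int) : List String :=
  let failures : List String := []
  let failures :=
    if ¬ (labels.any (fun label => TYPE_LABELS.contains label)) then
      failures ++ [typeMsg issue_num]
    else failures
  let failures :=
    if ¬ (labels.any (fun label => PySem.Str.startswith label "area:")) then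
      failures ++ [areaMsg issue_num]
    else failures
  failures

-- ===== PORT B =====
def altScan : List String → Bool → Bool → Bool × Bool
  | [], has_type, has_area => (has_type, has_area)
  | label :: rest, has_type, has_area =>
    if has_type && has_area then (has_type, has_area)
    else altScan rest (has_type || TYPE_LABELS.contains label)
                      (has_area || PySem.Str.startswith label "area:")

def validate_issue_labels_alt (labels : List String) (issue_num : Int) : List String :=
  let (has_type, has_area) := altScan labels false false
  let failures : List String := []
  let failures := if ¬ has_type then failures ++ [typeMsg issue_num] else failures
  let failures := if ¬ has_area then failures ++ [areaMsg issue_num] else failures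
  failures

-- ===== PRECONDITION & SPEC =====
def Spec_validate_issue_labels (labels : List String) (issue_num : Int) (out : List String) : Prop := out = validate_issue_labels_alt labels issue_num
instance (labels : List String) (issue_num : Int) (out : List String) : Decidable (Spec_validate_issue_labels labels issue_num out) := by unfold Spec_validate_issue_labels; infer_instance

-- ===== CLAIM (what is proved, stated in full; the proofs are below) =====
def Claim_equal_validate_issue_labels : Prop := ∀ (labels : List String) (issue_num : Int), Dom_validate_issue_labels labels issue_num → Spec_validate_issue_labels labels issue_num (validate_issue_labels labels issue_num)

-- ===== LEMMAS AND PROOFS =====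
theorem altScan_eq (labels : List String) (t a : Bool) :
    altScan labels t a =
      (t || labels.any (fun label => TYPE_LABELS.contains label),
       a || labels.any (fun label => PySem.Str.startswith label "area:")) := by
  induction labels generalizing t a with
  | nil => simp [altScan]
  | cons l rest ih =>
    simp only [altScan, List.any_cons]
    split_ifs with h
    · obtain ⟨ht, ha⟩ := Bool.and_eq_true_iff.mp h
      subst ht; subst ha; simp
    · rw [ih]; simp [Bool.or_assoc]

-- ===== VERDICT (by name: the statement is the Claim_ definition above) =====
theorem validate_issue_labels_spec : Claim_equal_validate_issue_labels := by
  intro labels issue_num _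
  unfold Spec_validate_issue_labels validate_issue_labels validate_issue_labels_alt
  rw [altScan_eq]
  simp
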